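-- pv_equiv track=rewrite | github.com/seeker71/Coherence-Network | api/app/services/telegram_alert_policy_service.py | _ordered_status_counts
-- ===== SOURCE A (Python) =====
-- from typing import Any
--
-- _STATUS_ORDER = ("pending", "running", "needs_decision", "failed", "completed")
--
-- def _ordered_status_counts(by_status: dict[str, Any]) -> list[tuple[str, int]]:
--     counts: dict[str, int] = {}
--     for key, value in by_status.items():
--         try:
--             counts[str(key).strip().lower()] = int(value or 0)
--         except (TypeError, ValueError):
--             counts[str(key).strip().lower()] = 0
--
--     rows: list[tuple[str, int]] = []
--     for key in _STATUS_ORDER: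
--         rows.append((key, counts.pop(key, 0)))
--     for key in sorted(k for k in counts if k):
--         rows.append((key, counts[key]))
--     return rows
-- ===== SOURCE B (Python) =====
-- _STATUS_ORDER = ("pending", "running", "needs_decision", "failed", "completed")
--
-- def _ordered_status_counts(by_status):
--     counts = {}
--     for key, value in by_status.items():
--         try:
--             counts[str(key).strip().lower()] = int(value or 0)
--         except (TypeError, ValueError):
--             counts[str(key).strip().lower()] = 0
--     counts.pop("", None)
--     for name in _STATUS_ORDER:
--         counts.setdefault(name, 0)
--     order = sorted(
--         counts,
--         key=lambda k: (_STATUS_ORDER.index(k), "")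
--         if k in _STATUS_ORDER
--         else (len(_STATUS_ORDER), k),
--     )
--     return [(k, counts[k]) for k in order]
-- ===== Notes on version B (the rewrite author's own statement) =====
-- stated objective: alternative
-- what changed: B builds the same normalized counts dict but replaces A's two assembly passes (fixed-order pop loop plus separate sorted remainder) with dropping the empty key, seeding the five priority names via setdefault, and one sort of the whole key set by a composite (priority-index, name) key.
import Mathlib
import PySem

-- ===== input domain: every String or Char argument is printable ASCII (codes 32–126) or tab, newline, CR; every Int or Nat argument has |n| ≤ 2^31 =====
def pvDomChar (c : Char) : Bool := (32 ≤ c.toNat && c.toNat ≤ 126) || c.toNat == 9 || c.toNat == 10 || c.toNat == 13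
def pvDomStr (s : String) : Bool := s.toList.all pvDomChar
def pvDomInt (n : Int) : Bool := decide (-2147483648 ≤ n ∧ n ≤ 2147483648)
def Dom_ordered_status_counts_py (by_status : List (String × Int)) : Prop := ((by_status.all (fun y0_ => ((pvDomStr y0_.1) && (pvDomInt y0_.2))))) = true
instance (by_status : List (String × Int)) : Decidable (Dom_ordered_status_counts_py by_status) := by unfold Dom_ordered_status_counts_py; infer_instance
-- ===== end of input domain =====

-- B replaces A's two assembly passes (fixed-order pop loop + separate sorted remainder) with one
-- composite-keyed sort of the whole key set; same return value (alternative decomposition, no speed claim).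

-- _STATUS_ORDER
def pvStatusOrder : List String := ["pending", "running", "needs_decision", "failed", "completed"]

-- ===== PORT A =====
def ordered_status_counts_py (by_status : List (String × Int)) : List (String × Int) :=
  -- counts[str(key).strip().lower()] = int(value or 0); with an int value this IS the value
  -- (int(0 or 0) = 0, int(v) = v), and the except branch is unreachable, so the port stores kv.2.
  let counts : PySem.Dict String Int :=
    by_status.foldl (fun d kv => d.insert (PySem.Str.lower (PySem.Str.strip kv.1)) kv.2) PySem.Dict.empty
  -- for key in _STATUS_ORDER: rows.append((key, counts.pop(key, 0)))
  let step : List (String × Int) × PySem.Dict String Int :=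
    pvStatusOrder.foldl
      (fun st key => (st.1 ++ [(key, st.2.getD key 0)], st.2.erase key)) ([], counts)
  -- for key in sorted(k for k in counts if k): rows.append((key, counts[key]))
  (PySem.List.sorted ((step.2.keys).filter (fun k => k != "")) (fun k => k) false).foldl
    (fun rows k => rows ++ [(k, step.2.getD k 0)]) step.1

-- ===== PORT B =====
def ordered_status_counts_py_alt (by_status : List (String × Int)) : List (String × Int) :=
  let counts0 : PySem.Dict String Int :=
    by_status.foldl (fun d kv => d.insert (PySem.Str.lower (PySem.Str.strip kv.1)) kv.2) PySem.Dict.empty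
  -- counts.pop("", None)
  let counts1 := counts0.erase ""
  -- for name in _STATUS_ORDER: counts.setdefault(name, 0)
  let counts := pvStatusOrder.foldl (fun d name => d.setdefault name 0) counts1
  -- sorted(counts, key=lambda k: (ORDER.index(k), "") if k in ORDER else (len(ORDER), k))
  let order := PySem.List.sorted2 counts.keys
      (fun k => if k ∈ pvStatusOrder then (((PySem.List.index? pvStatusOrder k).getD 0 : Nat) : Int)
                else (pvStatusOrder.length : Int))
      (fun k => if k ∈ pvStatusOrder then "" else k) false
  order.map (fun k => (k, counts.getD k 0))

-- ===== PRECONDITION & SPEC =====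
def Spec_ordered_status_counts_py (by_status : List (String × Int)) (out : List (String × Int)) : Prop := out = ordered_status_counts_py_alt by_status
instance (by_status : List (String × Int)) (out : List (String × Int)) : Decidable (Spec_ordered_status_counts_py by_status out) := by unfold Spec_ordered_status_counts_py; infer_instance

-- ===== CLAIM (what is proved, stated in full; the proofs are below) =====
def Claim_equal_ordered_status_counts_py : Prop := ∀ (by_status : List (String × Int)), Dom_ordered_status_counts_py by_status → Spec_ordered_status_counts_py by_status (ordered_status_counts_py by_status)

-- ===== LEMMAS AND PROOFS =====

theorem pv_get?_erase_of_ne {ν : Type} (d : PySem.Dict String ν) (k k' : String) (h : k' ≠ k) :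
    (d.erase k).get? k' = d.get? k' := by
  obtain ⟨l⟩ := d
  simp only [PySem.Dict.erase, PySem.Dict.get?]
  induction l with
  | nil => rfl
  | cons p t ih =>
    rcases eq_or_ne p.1 k with hp | hp
    · rw [List.filter_cons_of_neg (by simp [hp]),
        List.find?_cons_of_neg (by simp [hp, Ne.symm h]), ih]
    · rcases eq_or_ne p.1 k' with hp' | hp'
      · rw [List.filter_cons_of_pos (by simp [hp]),
          List.find?_cons_of_pos (by simp [hp']), List.find?_cons_of_pos (by simp [hp'])]
      · rw [List.filter_cons_of_pos (by simp [hp]),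
          List.find?_cons_of_neg (by simp [hp']), List.find?_cons_of_neg (by simp [hp']), ih]

theorem pv_keys_erase {ν : Type} (d : PySem.Dict String ν) (k : String) :
    (d.erase k).keys = d.keys.filter (fun x => x != k) := by
  obtain ⟨l⟩ := d
  simp only [PySem.Dict.erase, PySem.Dict.keys]
  induction l with
  | nil => rfl
  | cons p t ih =>
    rcases eq_or_ne p.1 k with hp | hp
    · rw [List.filter_cons_of_neg (by simp [hp]), List.map_cons,
        List.filter_cons_of_neg (by simp [hp]), ih]
    · rw [List.filter_cons_of_pos (by simp [hp]), List.map_cons, List.map_cons,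
        List.filter_cons_of_pos (by simp [hp]), ih]

theorem pv_getD_erase_of_ne (d : PySem.Dict String Int) (k k' : String) (h : k' ≠ k) :
    (d.erase k).getD k' 0 = d.getD k' 0 := by
  simp only [PySem.Dict.getD, pv_get?_erase_of_ne d k k' h]

theorem pv_foldA (Q : List String) (d : PySem.Dict String Int) (rows : List (String × Int))
    (hQ : Q.Nodup) :
    Q.foldl (fun st key => (st.1 ++ [(key, st.2.getD key 0)], st.2.erase key)) (rows, d)
      = (rows ++ Q.map (fun k => (k, d.getD k 0)), Q.foldl PySem.Dict.erase d) := by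
  induction Q generalizing d rows with
  | nil => simp
  | cons q Q ih =>
    simp only [List.foldl_cons, List.map_cons]
    rw [ih _ _ (List.Nodup.of_cons hQ)]
    have hq : q ∉ Q := (List.nodup_cons.mp hQ).1
    have h2 : Q.map (fun k => (k, (d.erase q).getD k 0)) = Q.map (fun k => (k, d.getD k 0)) := by
      apply List.map_congr_left
      intro a ha
      rw [pv_getD_erase_of_ne d q a (fun e => hq (e ▸ ha))]
    rw [h2]
    simp

theorem pv_keys_foldl_erase (Q : List String) (d : PySem.Dict String Int) :
    (Q.foldl PySem.Dict.erase d).keys = d.keys.filter (fun k => decide (k ∉ Q)) := by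
  induction Q generalizing d with
  | nil => simp
  | cons q Q ih =>
    simp only [List.foldl_cons]
    rw [ih, pv_keys_erase, List.filter_filter]
    apply List.filter_congr
    intro a _
    by_cases h1 : a = q <;> by_cases h2 : a ∈ Q <;> simp [h1, h2]

theorem pv_getD_foldl_erase (Q : List String) (d : PySem.Dict String Int) (k : String)
    (h : k ∉ Q) : (Q.foldl PySem.Dict.erase d).getD k 0 = d.getD k 0 := by
  induction Q generalizing d with
  | nil => rfl
  | cons q Q ih =>
    simp only [List.foldl_cons]
    rw [ih _ (fun hm => h (List.mem_cons_of_mem _ hm)),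
      pv_getD_erase_of_ne d q k (fun e => h (e ▸ List.mem_cons_self))]

theorem pv_keys_foldl_setdefault (Q : List String) (e : PySem.Dict String Int) (hQ : Q.Nodup) :
    (Q.foldl (fun d n => d.setdefault n 0) e).keys
      = e.keys ++ Q.filter (fun q => !(e.contains q)) := by
  induction Q generalizing e with
  | nil => simp
  | cons q Q ih =>
    simp only [List.foldl_cons]
    rw [ih _ (List.Nodup.of_cons hQ)]
    have hq : q ∉ Q := (List.nodup_cons.mp hQ).1
    have hfil : Q.filter (fun x => !((e.setdefault q 0).contains x))
        = Q.filter (fun x => !(e.contains x)) := by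
      apply List.filter_congr
      intro a ha
      rw [PySem.Dict.contains_setdefault]
      have hb : (a == q) = false := by
        simp only [beq_eq_false_iff_ne, ne_eq]
        exact fun e => hq (e ▸ ha)
      simp [hb]
    rw [hfil, PySem.Dict.keys_setdefault]
    by_cases hc : e.contains q = true
    · rw [if_pos hc, List.filter_cons_of_neg (by simp [hc])]
    · rw [if_neg hc, List.filter_cons_of_pos (by simp [hc])]
      simp

theorem pv_getD_foldl_setdefault (Q : List String) (e : PySem.Dict String Int) (k : String) :
    (Q.foldl (fun d n => d.setdefault n 0) e).getD k 0 = e.getD k 0 := by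
  induction Q generalizing e with
  | nil => rfl
  | cons q Q ih =>
    simp only [List.foldl_cons]
    rw [ih]
    rcases eq_or_ne k q with rfl | hne
    · exact PySem.Dict.getD_setdefault_self e k 0 0
    · simp only [PySem.Dict.getD, PySem.Dict.get?_setdefault_of_ne e 0 hne]

theorem pv_sorted2_eq_sorted_lex {α : Type} (xs : List α) (k1 : α → Int) (k2 : α → String) :
    PySem.List.sorted2 xs k1 k2 false
      = PySem.List.sorted xs (fun x => toLex (k1 x, k2 x)) false := by
  have hbef : ∀ a b : α,
      (decide (k1 a < k1 b) || (!decide (k1 b < k1 a) && decide (k2 a < k2 b)))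
        = decide (toLex (k1 a, k2 a) < toLex (k1 b, k2 b)) := by
    intro a b
    rcases lt_trichotomy (k1 a) (k1 b) with h | h | h
    · simp [Prod.Lex.lt_iff, h]
    · simp [Prod.Lex.lt_iff, h]
    · simp [Prod.Lex.lt_iff, h, asymm h, h.ne']
  simp only [PySem.List.sorted2, PySem.List.sorted, if_neg (by simp : ¬ (false = true))]
  congr 1
  funext acc x
  congr 1
  funext a b
  exact hbef a b

theorem pv_main (d : PySem.Dict String Int) (hnd : d.keys.Nodup) :
    (PySem.List.sorted
        (((pvStatusOrder.foldl (fun st key => (st.1 ++ [(key, st.2.getD key 0)], st.2.erase key))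
            (([] : List (String × Int)), d)).2.keys).filter (fun k => k != "")) (fun k => k) false).foldl
      (fun rows k => rows ++ [(k, (pvStatusOrder.foldl (fun st key => (st.1 ++ [(key, st.2.getD key 0)], st.2.erase key))
            (([] : List (String × Int)), d)).2.getD k 0)])
      (pvStatusOrder.foldl (fun st key => (st.1 ++ [(key, st.2.getD key 0)], st.2.erase key))
            (([] : List (String × Int)), d)).1
    = (PySem.List.sorted2 ((pvStatusOrder.foldl (fun d n => d.setdefault n 0) (d.erase "")).keys)
        (fun k => if k ∈ pvStatusOrder then (((PySem.List.index? pvStatusOrder k).getD 0 : Nat) : Int)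
                  else (pvStatusOrder.length : Int))
        (fun k => if k ∈ pvStatusOrder then "" else k) false).map
        (fun k => (k, (pvStatusOrder.foldl (fun d n => d.setdefault n 0) (d.erase "")).getD k 0)) := by
  have hP : pvStatusOrder.Nodup := by decide
  have hemp : ("" : String) ∉ pvStatusOrder := by decide
  rw [pv_foldA _ _ _ hP]
  dsimp only
  rw [PySem.List.foldl_append_singleton_eq_map, pv_sorted2_eq_sorted_lex,
    pv_keys_foldl_setdefault _ _ hP, pv_keys_erase]
  simp only [pv_getD_foldl_setdefault, pv_keys_foldl_erase,
    PySem.Dict.contains_eq_decide_mem_keys, pv_keys_erase, List.filter_filter]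
  -- names
  set key : String → Lex (Int × String) := fun k =>
    toLex (if k ∈ pvStatusOrder then (((PySem.List.index? pvStatusOrder k).getD 0 : Nat) : Int)
           else (pvStatusOrder.length : Int), if k ∈ pvStatusOrder then "" else k) with hkey
  set L0 : List String := d.keys.filter (fun k => (k != "") && decide (k ∉ pvStatusOrder)) with hL0
  set S : List String := PySem.List.sorted L0 (fun k => k) false with hS
  set F : List String := d.keys.filter (fun x => x != "") with hF
  set Pfil : List String := pvStatusOrder.filter (fun q => !decide (q ∈ F)) with hPfil
  -- membership in S
  have hmemS : ∀ k ∈ S, k ∈ d.keys ∧ k ∉ pvStatusOrder ∧ k ≠ "" := by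
    intro k hk
    rw [hS, PySem.List.mem_sorted, hL0, List.mem_filter] at hk
    obtain ⟨h1, h2⟩ := hk
    simp only [Bool.and_eq_true, bne_iff_ne, ne_eq, decide_eq_true_eq] at h2
    exact ⟨h1, h2.2, h2.1⟩
  have hndL0 : L0.Nodup := hnd.filter _
  have hndS : S.Nodup := ((PySem.List.sorted_perm L0 (fun k => k) false).nodup_iff).mpr hndL0
  -- the composite sort is P ++ S
  have hsorted : PySem.List.sorted (F ++ Pfil) key false = pvStatusOrder ++ S := by
    apply PySem.List.sorted_eq_of_perm_of_pairwise_lt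
    · -- permutation
      refine ((List.Perm.append_left pvStatusOrder (PySem.List.sorted_perm L0 (fun k => k) false)).trans ?_)
      apply List.perm_of_nodup_nodup_toFinset_eq
      · rw [List.nodup_append]
        refine ⟨hP, hndL0, ?_⟩
        intro a ha b hb
        rw [hL0, List.mem_filter] at hb
        simp only [Bool.and_eq_true, decide_eq_true_eq] at hb
        exact fun e => hb.2.2 (e ▸ ha)
      · rw [List.nodup_append]
        refine ⟨hnd.filter _, hP.filter _, ?_⟩
        intro a ha b hb
        rw [hPfil, List.mem_filter] at hb
        simp only [Bool.not_eq_true', decide_eq_false_iff_not] at hb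
        exact fun e => hb.2 (e ▸ ha)
      · ext x
        have hxP : x ∈ pvStatusOrder → x ≠ "" := fun hxp hxe => hemp (hxe ▸ hxp)
        simp only [List.toFinset_append, Finset.mem_union, List.mem_toFinset, hL0, hF, hPfil,
          List.mem_filter, Bool.and_eq_true, bne_iff_ne, ne_eq, decide_eq_true_eq,
          Bool.not_eq_true', decide_eq_false_iff_not]
        by_cases h1 : x ∈ pvStatusOrder <;> by_cases h2 : x ∈ d.keys <;>
          by_cases h3 : x = "" <;> simp_all
    · -- pairwise strictly increasing composite key
      rw [List.pairwise_append]
      refine ⟨by rw [hkey]; decide, ?_, ?_⟩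
      · have hlt : List.Pairwise (fun a b : String => a < b) S := by
          have h1 := PySem.List.sorted_pairwise L0 (fun k : String => k)
          rw [← hS] at h1
          exact (h1.and hndS).imp (fun h => lt_of_le_of_ne h.1 h.2)
        refine hlt.imp_of_mem ?_
        intro a b ha hb hab
        obtain ⟨_, hanP, _⟩ := hmemS a ha
        obtain ⟨_, hbnP, _⟩ := hmemS b hb
        rw [hkey]
        simp only [if_neg hanP, if_neg hbnP]
        exact Prod.Lex.lt_iff.mpr (Or.inr ⟨rfl, hab⟩)
      · intro p hp k hk
        obtain ⟨_, hknP, _⟩ := hmemS k hk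
        rw [hkey]
        simp only [if_pos hp, if_neg hknP]
        apply Prod.Lex.lt_iff.mpr
        left
        simp only [ofLex_toLex]
        simp only [pvStatusOrder, List.mem_cons, List.not_mem_nil, or_false] at hp
        rcases hp with rfl | rfl | rfl | rfl | rfl <;> decide
  rw [hsorted, List.map_append]
  congr 1
  · apply List.map_congr_left
    intro p hp
    have hpne : p ≠ "" := fun he => hemp (he ▸ hp)
    rw [pv_getD_erase_of_ne d "" p hpne]
  · apply List.map_congr_left
    intro k hk
    obtain ⟨hkd, hknP, hkne⟩ := hmemS k hk
    rw [pv_getD_foldl_erase _ _ _ hknP, pv_getD_erase_of_ne d "" k hkne]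

-- ===== VERDICT (by name: the statement is the Claim_ definition above) =====
theorem ordered_status_counts_py_spec : Claim_equal_ordered_status_counts_py := by
  intro bs _
  unfold Spec_ordered_status_counts_py ordered_status_counts_py ordered_status_counts_py_alt
  exact pv_main _ (PySem.Dict.nodup_keys_foldl_insert_key bs
    (fun kv => PySem.Str.lower (PySem.Str.strip kv.1)) _ PySem.Dict.empty (by simp [PySem.Dict.keys_empty]))
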